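-- pv_equiv track=rewrite | github.com/TinyOS-Camp/DDEA-DEV | DDEA-DEMO/data_retrieval.py | symbol_to_state
-- ===== SOURCE A (Python) =====
-- def symbol_to_state(symbol_list):
--
--     symbol_dict = dict()
--     symbol_val = list()
--     key_val = 1
--
--     for i, key_set in enumerate(symbol_list):
--         symbol_val_let = []
--
--         for key in key_set:
--             if key not in symbol_dict:
--
--                 if len(key) == 0:
--                     symbol_dict.update({key:0})
--                     symbol_val_let.append(0)
--
--                 else:
--                     symbol_dict.update({key:key_val})
--                     symbol_val_let.append(key_val)
--                     key_val = key_val + 1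
--             else:
--                 symbol_val_let.append(symbol_dict[key])
--         symbol_val.append(symbol_val_let)
--     return symbol_val, symbol_dict
-- ===== SOURCE B (Python) =====
-- def symbol_to_state(symbol_list):
--     # pass 1: build the dictionary only
--     symbol_dict = {}
--     key_val = 1
--     for key_set in symbol_list:
--         for key in key_set:
--             if key not in symbol_dict:
--                 if key:
--                     symbol_dict[key] = key_val
--                     key_val += 1
--                 else:
--                     symbol_dict[key] = 0
--     # pass 2: pure lookups
--     symbol_val = [[symbol_dict[key] for key in key_set] for key_set in symbol_list]
--     return symbol_val, symbol_dict
-- ===== Notes on version B (the rewrite author's own statement) =====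
-- stated objective: simpler
-- what changed: B splits A's single interleaved pass into two: a first pass that only builds the symbol dictionary (with the same first-seen numbering and empty-string-to-0 rule), then a second pass that produces the state lists purely by dictionary lookups via a nested comprehension.
import Mathlib
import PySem

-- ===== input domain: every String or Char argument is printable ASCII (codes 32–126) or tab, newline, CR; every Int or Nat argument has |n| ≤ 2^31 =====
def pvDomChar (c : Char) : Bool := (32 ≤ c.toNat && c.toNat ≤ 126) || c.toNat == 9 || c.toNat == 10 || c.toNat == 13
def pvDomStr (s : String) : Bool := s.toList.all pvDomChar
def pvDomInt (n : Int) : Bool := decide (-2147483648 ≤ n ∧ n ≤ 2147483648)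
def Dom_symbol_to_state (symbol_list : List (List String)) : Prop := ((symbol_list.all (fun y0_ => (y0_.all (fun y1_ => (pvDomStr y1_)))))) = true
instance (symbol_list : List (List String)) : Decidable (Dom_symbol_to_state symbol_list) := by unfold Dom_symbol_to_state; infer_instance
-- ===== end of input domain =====

-- B re-implements A by two split passes: build the symbol dictionary first, then produce the
-- state lists by pure lookups (objective: simpler decomposition; same cost).

-- ===== PORT A =====
-- A: one pass carrying (symbol_val, symbol_dict, key_val) together; appends to the current
-- row while assigning fresh states.
def symbol_to_state (symbol_list : List (List String)) : List (List Int) × (List (String × Int)) :=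
  let res := symbol_list.foldl
    (fun (acc : List (List Int) × PySem.Dict String Int × Int) key_set =>
      let inner := key_set.foldl
        (fun (st : List Int × PySem.Dict String Int × Int) key =>
          let lst := st.1; let d := st.2.1; let kv := st.2.2
          if d.contains key = false then
            if PySem.Str.len key = 0 then
              (lst ++ [0], d.insert key 0, kv)
            else
              (lst ++ [kv], d.insert key kv, kv + 1)
          else
            (lst ++ [d.getD key 0], d, kv))  -- symbol_dict[key]: key is present here
        ([], acc.2.1, acc.2.2)
      (acc.1 ++ [inner.1], inner.2.1, inner.2.2))
    ([], PySem.Dict.empty, 1)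
  (res.1, res.2.1.items)

-- ===== PORT B =====
-- B pass-1 body: assign a state to one key if unseen
def stsAssign (st : PySem.Dict String Int × Int) (key : String) : PySem.Dict String Int × Int :=
  if st.1.contains key = false then
    if key ≠ "" then (st.1.insert key st.2, st.2 + 1)
    else (st.1.insert key 0, st.2)
  else st

def symbol_to_state_alt (symbol_list : List (List String)) : List (List Int) × (List (String × Int)) :=
  let st := symbol_list.foldl (fun st key_set => key_set.foldl stsAssign st) (PySem.Dict.empty, 1)
  let d := st.1
  (symbol_list.map (fun key_set => key_set.map (fun key => d.getD key 0)), d.items)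

-- ===== PRECONDITION & SPEC =====
def Spec_symbol_to_state (symbol_list : List (List String)) (out : List (List Int) × (List (String × Int))) : Prop := out = symbol_to_state_alt symbol_list
instance (symbol_list : List (List String)) (out : List (List Int) × (List (String × Int))) : Decidable (Spec_symbol_to_state symbol_list out) := by unfold Spec_symbol_to_state; infer_instance

-- ===== CLAIM (what is proved, stated in full; the proofs are below) =====
def Claim_equal_symbol_to_state : Prop := ∀ (symbol_list : List (List String)), Dom_symbol_to_state symbol_list → Spec_symbol_to_state symbol_list (symbol_to_state symbol_list)

-- ===== LEMMAS AND PROOFS =====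

-- one assignment step only extends the dictionary: existing bindings survive
theorem stsAssign_mono (st : PySem.Dict String Int × Int) (key k : String) (v : Int)
    (h : st.1.get? k = some v) : (stsAssign st key).1.get? k = some v := by
  have he : st.1.contains key = false → k ≠ key := by
    rintro hc rfl
    rw [PySem.Dict.contains_eq_isSome_get?, h] at hc; simp at hc
  unfold stsAssign
  split_ifs with hc hk
  · simp [PySem.Dict.get?_insert, he hc, h]
  · simp [PySem.Dict.get?_insert, he hc, h]
  · exact h

theorem foldl_stsAssign_mono (ks : List String) (st : PySem.Dict String Int × Int) (k : String) (v : Int)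
    (h : st.1.get? k = some v) : (ks.foldl stsAssign st).1.get? k = some v := by
  induction ks generalizing st with
  | nil => exact h
  | cons a t ih => exact ih _ (stsAssign_mono st a k v h)

theorem foldl2_stsAssign_mono (ls : List (List String)) (st : PySem.Dict String Int × Int) (k : String) (v : Int)
    (h : st.1.get? k = some v) :
    (ls.foldl (fun st key_set => key_set.foldl stsAssign st) st).1.get? k = some v := by
  induction ls generalizing st with
  | nil => exact h
  | cons a t ih => exact ih _ (foldl_stsAssign_mono a st k v h)

-- A's len(key)==0 test is key = ""
theorem strlen_eq_zero_iff (s : String) : PySem.Str.len s = 0 ↔ s = "" := by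
  simp [PySem.Str.len_eq]

-- A's inner fold: values part appends, dict/key_val part is B's fold
theorem innerA_eq (ks : List String) (lst : List Int) (d : PySem.Dict String Int) (kv : Int)
    (D : PySem.Dict String Int)
    (hD : ∀ k v, (ks.foldl stsAssign (d, kv)).1.get? k = some v → D.get? k = some v) :
    ks.foldl
      (fun (st : List Int × PySem.Dict String Int × Int) key =>
        let lst := st.1; let d := st.2.1; let kv := st.2.2
        if d.contains key = false then
          if PySem.Str.len key = 0 then
            (lst ++ [0], d.insert key 0, kv)
          else
            (lst ++ [kv], d.insert key kv, kv + 1)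
        else
          (lst ++ [d.getD key 0], d, kv))
      (lst, d, kv)
    = (lst ++ ks.map (fun key => D.getD key 0), ks.foldl stsAssign (d, kv)) := by
  induction ks generalizing lst d kv with
  | nil => simp
  | cons a t ih =>
    -- value appended for the head key, and the binding it leaves behind
    have hstep : ∃ v : Int, (stsAssign (d, kv) a).1.get? a = some v ∧
        (if d.contains a = false then
          if PySem.Str.len a = 0 then (lst ++ [0], d.insert a 0, kv)
          else (lst ++ [kv], d.insert a kv, kv + 1)
        else (lst ++ [d.getD a 0], d, kv))
        = (lst ++ [v], stsAssign (d, kv) a) := by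
      by_cases hc : d.contains a = false
      · by_cases ha : a = ""
        · subst ha
          refine ⟨0, ?_, ?_⟩ <;>
            simp [stsAssign, hc, (strlen_eq_zero_iff "").2 rfl, PySem.Dict.get?_insert_self]
        · have hl : ¬ PySem.Str.len a = 0 := fun h => ha ((strlen_eq_zero_iff a).1 h)
          refine ⟨kv, ?_, ?_⟩ <;>
            simp [stsAssign, hc, ha, hl, PySem.Dict.get?_insert_self]
      · have hc' : d.contains a = true := by simpa using hc
        have hsome : (d.get? a).isSome := by
          rw [← PySem.Dict.contains_eq_isSome_get?]; exact hc'
        obtain ⟨w, hw⟩ := Option.isSome_iff_exists.mp hsome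
        refine ⟨w, ?_, ?_⟩ <;>
          simp [stsAssign, hc', hw, PySem.Dict.getD_eq_get?_getD]
    obtain ⟨v, hv, hstepEq⟩ := hstep
    have hDa : D.getD a 0 = v := by
      have : D.get? a = some v := by
        apply hD
        exact foldl_stsAssign_mono t _ a v hv
      simp [PySem.Dict.getD_eq_get?_getD, this]
    simp only [List.foldl_cons]
    rw [hstepEq]
    have := ih (lst ++ [v]) (stsAssign (d, kv) a).1 (stsAssign (d, kv) a).2
      (by intro k v' h; exact hD k v' (by simpa using h))
    simpa [hDa, List.append_assoc] using this

-- A's outer fold against the final dictionary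
theorem outerA_eq (ls : List (List String)) (sv : List (List Int)) (d : PySem.Dict String Int) (kv : Int)
    (D : PySem.Dict String Int)
    (hD : ∀ k v, (ls.foldl (fun st key_set => key_set.foldl stsAssign st) (d, kv)).1.get? k = some v → D.get? k = some v) :
    ls.foldl
      (fun (acc : List (List Int) × PySem.Dict String Int × Int) key_set =>
        let inner := key_set.foldl
          (fun (st : List Int × PySem.Dict String Int × Int) key =>
            let lst := st.1; let d := st.2.1; let kv := st.2.2
            if d.contains key = false then
              if PySem.Str.len key = 0 then
                (lst ++ [0], d.insert key 0, kv)
              else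
                (lst ++ [kv], d.insert key kv, kv + 1)
            else
              (lst ++ [d.getD key 0], d, kv))
          ([], acc.2.1, acc.2.2)
        (acc.1 ++ [inner.1], inner.2.1, inner.2.2))
      (sv, d, kv)
    = (sv ++ ls.map (fun key_set => key_set.map (fun key => D.getD key 0)),
       ls.foldl (fun st key_set => key_set.foldl stsAssign st) (d, kv)) := by
  induction ls generalizing sv d kv with
  | nil => simp
  | cons a t ih =>
    simp only [List.foldl_cons]
    have hinner := innerA_eq a [] d kv D
      (by
        intro k v h
        apply hD
        exact foldl2_stsAssign_mono t _ k v h)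
    rw [hinner]
    have := ih (sv ++ [a.map (fun key => D.getD key 0)])
      (a.foldl stsAssign (d, kv)).1 (a.foldl stsAssign (d, kv)).2
      (by intro k v h; exact hD k v (by simpa using h))
    simpa [List.append_assoc] using this

-- ===== VERDICT (by name: the statement is the Claim_ definition above) =====
theorem symbol_to_state_spec : Claim_equal_symbol_to_state := by
  intro ls _
  unfold Spec_symbol_to_state symbol_to_state symbol_to_state_alt
  have h := outerA_eq ls [] PySem.Dict.empty 1
    (ls.foldl (fun st key_set => key_set.foldl stsAssign st) (PySem.Dict.empty, 1)).1
    (fun _ _ h => h)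
  simp only [h, List.nil_append]
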